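-- pv_equiv track=rewrite | github.com/dhruva-shashi/cartoon-compression | utils.py | charToBinStr
-- ===== SOURCE A (Python) =====
-- def charToBinStr(c):
-- 	num = ord(c)
-- 	res = ''
-- 	i = 8
--
-- 	while i > 0:
-- 		res += chr((num%2)+ord('0'))
-- 		num //= 2
-- 		i -= 1
--
-- 	return res
-- ===== SOURCE B (Python) =====
-- def charToBinStr(c):
-- 	# Closed-form: 8-bit binary via format(), reversed to match LSB-first order.
-- 	return format(ord(c) & 0xFF, '08b')[::-1]
-- ===== Notes on version B (the rewrite author's own statement) =====
-- stated objective: idiomatic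
-- what changed: Replaces the manual 8-iteration divide-by-2 bit-extraction loop with a closed-form library conversion: zero-padded 8-bit format() of the masked code point, reversed.
import Mathlib
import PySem

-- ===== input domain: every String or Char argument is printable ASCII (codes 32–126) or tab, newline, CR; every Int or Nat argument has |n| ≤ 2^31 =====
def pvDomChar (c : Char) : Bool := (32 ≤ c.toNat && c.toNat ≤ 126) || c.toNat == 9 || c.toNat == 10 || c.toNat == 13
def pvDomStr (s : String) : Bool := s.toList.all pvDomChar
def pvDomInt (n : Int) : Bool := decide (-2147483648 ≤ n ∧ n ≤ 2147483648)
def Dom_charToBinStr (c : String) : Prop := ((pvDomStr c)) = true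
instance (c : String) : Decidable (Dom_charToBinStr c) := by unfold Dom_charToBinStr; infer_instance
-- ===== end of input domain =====

-- B replaces A's bit-by-bit division loop with a closed-form format-and-reverse conversion (same values on all single-char inputs).

-- ===== PORT A =====
-- while i > 0: res += chr((num%2)+ord('0')); num //= 2; i -= 1
def pvBitLoopA (num : Int) (res : List Char) (i : Nat) : List Char :=
  match i with
  | 0 => res
  | i + 1 =>
      pvBitLoopA (PySem.Int.floordiv num 2)
        (res ++ [Char.ofNat ((PySem.Int.mod num 2) + 48).toNat]) i

def charToBinStr (c : String) : String :=
  match c.toList with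
  | [ch] => String.ofList (pvBitLoopA (Int.ofNat ch.toNat) [] 8)
  | _ => ""   -- ord(c) raises TypeError here; excluded by Pre_charToBinStr

-- ===== PORT B =====
-- format(ord(c) & 0xFF, '08b')[::-1]
def charToBinStr_alt (c : String) : String :=
  if h : c.toList.length = 1 then
    let ch := c.toList[0]
    let s := PySem.Int.toBinChars (Int.ofNat (ch.toNat &&& 255))
    String.ofList ((List.replicate (8 - s.length) '0' ++ s).reverse)
  else ""   -- ord(c) raises TypeError here; excluded by Pre_charToBinStr

-- ===== PRECONDITION & SPEC =====
-- Pre_: ord(c) requires a single character; on other strings A raises TypeError.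
def Pre_charToBinStr (c : String) : Prop := c.toList.length = 1
instance (c : String) : Decidable (Pre_charToBinStr c) := by unfold Pre_charToBinStr; infer_instance
def pvWitness_charToBinStr : String := "a"

def Spec_charToBinStr (c : String) (out : String) : Prop := out = charToBinStr_alt c
instance (c : String) (out : String) : Decidable (Spec_charToBinStr c out) := by unfold Spec_charToBinStr; infer_instance

-- ===== CLAIM =====
def Claim_equal_charToBinStr : Prop := ∀ (c : String), Dom_charToBinStr c → Pre_charToBinStr c → Spec_charToBinStr c (charToBinStr c)

-- ===== LEMMAS AND PROOFS =====
set_option maxRecDepth 10000 in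
lemma charToBinStr_key : ∀ n : Fin 256,
    pvBitLoopA (Int.ofNat n.val) [] 8 =
      (List.replicate (8 - (PySem.Int.toBinChars (Int.ofNat (n.val &&& 255))).length) '0'
        ++ PySem.Int.toBinChars (Int.ofNat (n.val &&& 255))).reverse := by
  decide

-- ===== VERDICT =====
theorem charToBinStr_spec : Claim_equal_charToBinStr := by
  intro c hdom hpre
  unfold Spec_charToBinStr charToBinStr charToBinStr_alt
  unfold Pre_charToBinStr at hpre
  unfold Dom_charToBinStr pvDomStr at hdom
  obtain ⟨ch, hc⟩ : ∃ ch, c.toList = [ch] := by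
    match hx : c.toList with
    | [ch] => exact ⟨ch, rfl⟩
    | [] => rw [hx] at hpre; simp at hpre
    | a :: b :: t => rw [hx] at hpre; simp at hpre
  have hch : pvDomChar ch = true := by
    rw [hc] at hdom; simpa using hdom
  have hlt : ch.toNat < 256 := by
    unfold pvDomChar at hch
    simp only [Bool.or_eq_true, Bool.and_eq_true, decide_eq_true_eq, beq_iff_eq] at hch
    omega
  rw [dif_pos hpre]
  simp only [hc]
  exact congrArg String.ofList (charToBinStr_key ⟨ch.toNat, hlt⟩)
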